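-- pv_equiv track=rewrite | github.com/pokerdio/generic | euler/euler-103.py | wobble
-- ===== SOURCE A (Python) =====
-- from itertools import combinations, product
--
-- def special_sum(s):
--     n = len(s)
--     for i in range(n):
--         a, b = s[:i + 1], s[n - i:]
--         if sum(a) <= sum(b):
--             return False
--
--     sums = set()
--     for m in range(1, n + 1):
--         for sub in combinations(s, m):
--             subsum = sum(sub)
--             if subsum in sums:
--                 return False
--             sums.add(subsum)
--
--     return True
--
-- def wobble(s, delta):
--     best = sum(s)
--     bests = s
--     for vdelta in product(range(-delta, delta + 1), repeat=len(s)):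
--         s2 = [a + b for a, b in zip(s, vdelta)]
--         sums2 = sum(s2)
--         if sums2 < best:
--             if special_sum(s2):
--                 best = sums2
--                 bests = s2
--     return bests
-- ===== SOURCE B (Python) =====
-- from itertools import product
--
-- def special_sum_b(s):
--     # phase 1: running front/back sums instead of re-slicing and re-summing
--     front = 0
--     back = 0
--     for x, y in zip(s, reversed(s)):
--         front += x
--         if front <= back:
--             return False
--         back += y
--     # phase 2: one bitmask loop over all non-empty subsets instead of combinations by size
--     sums = set()
--     for mask in range(1, 1 << len(s)):
--         t = 0
--         m = mask
--         for x in s: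
--             if m % 2 == 1:
--                 t += x
--             m //= 2
--         if t in sums:
--             return False
--         sums.add(t)
--     return True
--
-- def wobble(s, delta):
--     best = sum(s)
--     bests = s
--     for vdelta in product(range(-delta, delta + 1), repeat=len(s)):
--         s2 = [a + b for a, b in zip(s, vdelta)]
--         sums2 = sum(s2)
--         if sums2 < best:
--             if special_sum_b(s2):
--                 best = sums2
--                 bests = s2
--     return bests
-- ===== Notes on version B (the rewrite author's own statement) =====
-- stated objective: alternative
-- what changed: special_sum is re-decomposed: the size-by-size itertools.combinations enumeration with repeated slicing/summing is replaced by one running front/back-sum pass over zip(s, reversed(s)) for the dominance check and a single bitmask loop over all non-empty subsets for the distinct-sums check; the outer product loop and strict < tie-breaking are kept.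
import Mathlib
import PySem

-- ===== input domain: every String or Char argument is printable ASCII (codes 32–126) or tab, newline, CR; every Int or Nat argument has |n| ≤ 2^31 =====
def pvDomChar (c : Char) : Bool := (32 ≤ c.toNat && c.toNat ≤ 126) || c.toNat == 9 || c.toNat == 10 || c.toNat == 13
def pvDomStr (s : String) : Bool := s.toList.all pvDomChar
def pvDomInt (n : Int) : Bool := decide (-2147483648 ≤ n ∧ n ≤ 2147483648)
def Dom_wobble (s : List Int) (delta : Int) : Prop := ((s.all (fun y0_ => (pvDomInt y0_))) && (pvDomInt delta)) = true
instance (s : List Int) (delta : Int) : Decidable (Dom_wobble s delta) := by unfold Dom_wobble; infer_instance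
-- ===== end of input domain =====

-- B re-decomposes special_sum (running front/back sums over zip(s, reversed(s)) + one bitmask loop
-- over all non-empty subsets instead of size-by-size combinations with re-slicing); same outer loop.


-- ===== PORT A =====
-- itertools.combinations(s, m) in Python's emission order
def combosA : List Int → Nat → List (List Int)
  | _, 0 => [[]]
  | [], _ + 1 => []
  | x :: xs, m + 1 => (combosA xs m).map (fun c => x :: c) ++ combosA xs (m + 1)

-- 'for i in range(n): a, b = s[:i+1], s[n-i:]; if sum(a) <= sum(b): return False'
def phase1A (s : List Int) (n : Int) : List Int → Bool
  | [] => true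
  | i :: rest =>
    if (PySem.List.slice s none (some (i + 1))).sum ≤ (PySem.List.slice s (some (n - i)) none).sum
    then false else phase1A s n rest

-- inner 'for sub in combinations(s, m)' loop; none = the early 'return False'
def innerA : List (List Int) → PySem.Set Int → Option (PySem.Set Int)
  | [], sums => some sums
  | sub :: rest, sums =>
    if PySem.Set.contains sums sub.sum then none
    else innerA rest (PySem.Set.add sums sub.sum)

-- outer 'for m in range(1, n+1)' loop
def phase2A (s : List Int) : List Int → PySem.Set Int → Bool
  | [], _ => true
  | m :: ms, sums =>
    match innerA (combosA s m.toNat) sums with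
    | none => false
    | some sums' => phase2A s ms sums'

def specialSumA (s : List Int) : Bool :=
  if phase1A s (s.length : Int) (PySem.List.pyRange 0 (s.length : Int) 1)
  then phase2A s (PySem.List.pyRange 1 ((s.length : Int) + 1) 1) PySem.Set.empty
  else false

-- itertools.product(r, repeat=k) in Python's order (shared by both ports: B's outer loop is A's)
def prodRep (r : List Int) : Nat → List (List Int)
  | 0 => [[]]
  | k + 1 => r.flatMap (fun v => (prodRep r k).map (fun t => v :: t))

def wobble (s : List Int) (delta : Int) : List Int :=
  ((prodRep (PySem.List.pyRange (-delta) (delta + 1) 1) s.length).foldl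
    (fun (st : Int × List Int) vdelta =>
      let s2 := (s.zip vdelta).map (fun p => p.1 + p.2)
      if s2.sum < st.1 then (if specialSumA s2 then (s2.sum, s2) else st) else st)
    (s.sum, s)).2

-- ===== PORT B =====
-- 'for x, y in zip(s, reversed(s)): front += x; if front <= back: return False; back += y'
def phase1B : List (Int × Int) → Int → Int → Bool
  | [], _, _ => true
  | (x, y) :: rest, front, back =>
    if front + x ≤ back then false else phase1B rest (front + x) (back + y)

-- 't = 0; m = mask; for x in s: if m % 2 == 1: t += x; m //= 2'
def selSumB : List Int → Int → Int → Int
  | [], t, _ => t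
  | x :: xs, t, m => selSumB xs (if PySem.Int.mod m 2 = 1 then t + x else t) (PySem.Int.floordiv m 2)

-- 'for mask in range(1, 1 << len(s))' loop with the seen-sums set
def phase2B (s : List Int) : List Int → PySem.Set Int → Bool
  | [], _ => true
  | mask :: rest, sums =>
    if PySem.Set.contains sums (selSumB s 0 mask) then false
    else phase2B s rest (PySem.Set.add sums (selSumB s 0 mask))

def specialSumB (s : List Int) : Bool :=
  if phase1B (s.zip s.reverse) 0 0
  then phase2B s (PySem.List.pyRange 1 ((1 : Int) <<< s.length) 1) PySem.Set.empty
  else false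

def wobble_alt (s : List Int) (delta : Int) : List Int :=
  ((prodRep (PySem.List.pyRange (-delta) (delta + 1) 1) s.length).foldl
    (fun (st : Int × List Int) vdelta =>
      let s2 := (s.zip vdelta).map (fun p => p.1 + p.2)
      if s2.sum < st.1 then (if specialSumB s2 then (s2.sum, s2) else st) else st)
    (s.sum, s)).2

-- ===== PRECONDITION & SPEC =====
def Spec_wobble (s : List Int) (delta : Int) (out : List Int) : Prop := out = wobble_alt s delta
instance (s : List Int) (delta : Int) (out : List Int) : Decidable (Spec_wobble s delta out) := by unfold Spec_wobble; infer_instance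

-- ===== CLAIM (what is proved, stated in full; the proofs are below) =====
def Claim_equal_wobble : Prop := ∀ (s : List Int) (delta : Int), Dom_wobble s delta → Spec_wobble s delta (wobble s delta)

-- ===== LEMMAS AND PROOFS =====
def chk : List Int → PySem.Set Int → Bool
  | [], _ => true
  | t :: ts, seen =>
    if PySem.Set.contains seen t then false else chk ts (PySem.Set.add seen t)

def pick : List Int → Nat → List Int
  | [], _ => []
  | x :: xs, m => (if m % 2 = 1 then [x] else []) ++ pick xs (m / 2)

lemma all_congr' {α : Type} (l : List α) (p q : α → Bool) (h : ∀ a ∈ l, p a = q a) : l.all p = l.all q := by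
  induction l with
  | nil => rfl
  | cons a l ih => simp only [List.all_cons, h a (by simp), ih (fun b hb => h b (by simp [hb]))]

lemma phase1A_all (s : List Int) (n : Int) (l : List Int) :
    phase1A s n l = l.all (fun i =>
      !decide ((PySem.List.slice s none (some (i + 1))).sum ≤ (PySem.List.slice s (some (n - i)) none).sum)) := by
  induction l with
  | nil => rfl
  | cons i rest ih =>
    by_cases h : (PySem.List.slice s none (some (i + 1))).sum ≤ (PySem.List.slice s (some (n - i)) none).sum
    · simp [phase1A, h]
    · simp [phase1A, h, ih]

lemma pick_zero (s : List Int) : pick s 0 = [] := by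
  induction s with
  | nil => rfl
  | cons x xs ih => simp [pick, ih]

lemma selSumB_pick (s : List Int) (t : Int) (m : Nat) :
    selSumB s t (m : Int) = t + (pick s m).sum := by
  induction s generalizing t m with
  | nil => simp [selSumB, pick]
  | cons x xs ih =>
    have h1 : PySem.Int.mod (m : Int) 2 = ((m % 2 : Nat) : Int) := by
      exact_mod_cast PySem.Int.mod_natCast m 2
    have h2 : PySem.Int.floordiv (m : Int) 2 = ((m / 2 : Nat) : Int) := by
      exact_mod_cast PySem.Int.floordiv_natCast m 2
    show selSumB xs (if PySem.Int.mod (m : Int) 2 = 1 then t + x else t)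
        (PySem.Int.floordiv (m : Int) 2) = t + (pick (x :: xs) m).sum
    rw [h1, h2]
    by_cases hm : m % 2 = 1
    · rw [if_pos (by rw [hm]; norm_num), ih]
      simp [pick, hm]
      omega
    · rw [if_neg (by omega), ih]
      simp [pick, hm]

lemma combosA_big (xs : List Int) (m : Nat) (h : xs.length < m) : combosA xs m = [] := by
  induction xs generalizing m with
  | nil => cases m with
    | zero => omega
    | succ k => rfl
  | cons x xs ih =>
    cases m with
    | zero => omega
    | succ k =>
      simp at h
      simp [combosA, ih k (by omega), ih (k+1) (by omega)]

lemma chk_iff (l : List Int) (seen : PySem.Set Int) :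
    chk l seen = true ↔ l.Nodup ∧ ∀ x ∈ l, x ∉ seen := by
  induction l generalizing seen with
  | nil => simp [chk]
  | cons t ts ih =>
    by_cases h : PySem.Set.contains seen t = true
    · have ht : t ∈ seen := (PySem.Set.contains_iff seen t).mp h
      simp only [chk, if_pos h]
      exact iff_of_false (by simp) (fun hh => hh.2 t (by simp) ht)
    · have ht : t ∉ seen := fun hm => h ((PySem.Set.contains_iff seen t).mpr hm)
      simp only [chk, if_neg h, ih, List.nodup_cons, List.mem_cons]
      constructor
      · rintro ⟨hnd, hall⟩
        refine ⟨⟨fun hmem => (hall t hmem ?_).elim, hnd⟩, ?_⟩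
        · exact (PySem.Set.mem_add seen t t).mpr (Or.inr rfl)
        · rintro x (rfl | hx)
          · exact ht
          · intro hs; exact hall x hx ((PySem.Set.mem_add seen t x).mpr (Or.inl hs))
      · rintro ⟨⟨htts, hnd⟩, hall⟩
        refine ⟨hnd, fun x hx hadd => ?_⟩
        rcases (PySem.Set.mem_add seen t x).mp hadd with hs | rfl
        · exact hall x (Or.inr hx) hs
        · exact htts hx

lemma innerA_none (subs : List (List Int)) (seen : PySem.Set Int) (rest : List Int)
    (h : innerA subs seen = none) : chk (subs.map (·.sum) ++ rest) seen = false := by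
  induction subs generalizing seen with
  | nil => simp [innerA] at h
  | cons sub subs ih =>
    by_cases hc : PySem.Set.contains seen sub.sum = true
    · simp only [List.map_cons, List.cons_append, chk, if_pos hc]
    · simp only [innerA, if_neg hc] at h
      simp only [List.map_cons, List.cons_append, chk, if_neg hc]
      exact ih _ h

lemma innerA_some (subs : List (List Int)) (seen s' : PySem.Set Int) (rest : List Int)
    (h : innerA subs seen = some s') : chk (subs.map (·.sum) ++ rest) seen = chk rest s' := by
  induction subs generalizing seen with
  | nil =>
    simp only [innerA, Option.some.injEq] at h
    simp [h]
  | cons sub subs ih =>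
    by_cases hc : PySem.Set.contains seen sub.sum = true
    · simp only [innerA, if_pos hc] at h
      cases h
    · simp only [innerA, if_neg hc] at h
      simp only [List.map_cons, List.cons_append, chk, if_neg hc]
      exact ih _ h

lemma phase2A_chk (s : List Int) (ms : List Int) (seen : PySem.Set Int) :
    phase2A s ms seen = chk (ms.flatMap (fun m => (combosA s m.toNat).map (·.sum))) seen := by
  induction ms generalizing seen with
  | nil => rfl
  | cons m ms ih =>
    simp only [phase2A, List.flatMap_cons]
    cases hinner : innerA (combosA s m.toNat) seen with
    | none => rw [innerA_none _ _ _ hinner]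
    | some s' =>
      rw [innerA_some _ _ _ _ hinner]
      exact ih s'

lemma phase2B_chk (s : List Int) (masks : List Int) (seen : PySem.Set Int) :
    phase2B s masks seen = chk (masks.map (fun m => selSumB s 0 m)) seen := by
  induction masks generalizing seen with
  | nil => rfl
  | cons mask rest ih => simp only [phase2B, chk, List.map_cons, ih]

lemma phase1B_all (t : List Int) : ∀ (u : List Int) (front back : Int),
    phase1B (t.zip u) front back = (List.range (min t.length u.length)).all
      (fun j => !decide (front + (t.take (j + 1)).sum ≤ back + (u.take j).sum)) := by
  induction t with
  | nil => intro u front back; simp [phase1B]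
  | cons x t' ih =>
    intro u front back
    cases u with
    | nil => simp [phase1B]
    | cons y u' =>
      have hr : (List.range (min (x :: t').length (y :: u').length)).all
            (fun j => !decide (front + ((x :: t').take (j + 1)).sum ≤ back + ((y :: u').take j).sum))
          = ((!decide (front + x ≤ back)) &&
            (List.range (min t'.length u'.length)).all
              (fun j => !decide ((front + x) + (t'.take (j + 1)).sum ≤ (back + y) + (u'.take j).sum))) := by
        rw [List.length_cons, List.length_cons, Nat.succ_min_succ, List.range_succ_eq_map,
          List.all_cons, List.all_map]
        congr 1
        · simp
        · refine congrArg _ (funext fun j => ?_)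
          simp only [Function.comp, List.take_succ_cons, List.sum_cons]
          congr 1
          rw [decide_eq_decide]
          omega
      rw [List.zip_cons_cons, phase1B, hr]
      by_cases h : front + x ≤ back
      · simp [h]
      · rw [if_neg h, ih u' (front + x) (back + y)]
        simp [h]

lemma phase1_eq (s : List Int) :
    phase1A s (s.length : Int) (PySem.List.pyRange 0 (s.length : Int) 1) = phase1B (s.zip s.reverse) 0 0 := by
  rw [phase1A_all, phase1B_all, PySem.List.pyRange_zero_nat, List.all_map, List.length_reverse,
    Nat.min_self]
  apply all_congr'
  intro j hj
  rw [List.mem_range] at hj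
  have e1 : ((j : Int) + 1).toNat = j + 1 := by omega
  have e2 : ((s.length : Int) - (j : Int)).toNat = s.length - j := by omega
  simp only [Function.comp, PySem.List.slice_to s (by omega : (0:Int) ≤ (j:Int) + 1),
    PySem.List.slice_from s (by omega : (0:Int) ≤ (s.length : Int) - (j : Int)), e1, e2,
    List.take_reverse, List.sum_reverse]
  congr 1
  rw [decide_eq_decide]
  omega

lemma range_even_odd (n : Nat) :
    (List.range (2 ^ (n + 1))).Perm
      ((List.range (2 ^ n)).map (fun k => 2 * k) ++ (List.range (2 ^ n)).map (fun k => 2 * k + 1)) := by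
  have h2 : 2 ^ (n + 1) = 2 ^ n * 2 := pow_succ 2 n
  apply (List.perm_ext_iff_of_nodup (List.nodup_range) ?_).mpr
  · intro m
    simp only [List.mem_range, List.mem_append, List.mem_map]
    constructor
    · intro hm
      rcases Nat.even_or_odd m with ⟨k, hk⟩ | ⟨k, hk⟩
      · exact Or.inl ⟨k, by omega, by omega⟩
      · exact Or.inr ⟨k, by omega, by omega⟩
    · rintro (⟨k, hk, rfl⟩ | ⟨k, hk, rfl⟩) <;> omega
  · refine List.Nodup.append ?_ ?_ ?_
    · exact List.nodup_range.map (fun a b h => by omega)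
    · exact List.nodup_range.map (fun a b h => by omega)
    · intro a ha hb
      rcases List.mem_map.mp ha with ⟨k, -, rfl⟩
      rcases List.mem_map.mp hb with ⟨j, -, hj⟩
      omega

lemma pick_double (x : Int) (xs : List Int) (k : Nat) : pick (x :: xs) (2 * k) = pick xs k := by
  simp [pick, show (2 * k) % 2 = 0 by omega, show 2 * k / 2 = k by omega]

lemma pick_double_one (x : Int) (xs : List Int) (k : Nat) : pick (x :: xs) (2 * k + 1) = x :: pick xs k := by
  simp [pick, show (2 * k + 1) % 2 = 1 by omega, show (2 * k + 1) / 2 = k by omega]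

lemma flatMap_succ_head (g : Nat → List (List Int)) (hg : g 0 = [[]]) :
    ∀ n, (List.range (n + 1)).flatMap g = [] :: (List.range n).flatMap (fun m => g (m + 1)) := by
  intro n
  rw [List.range_succ_eq_map, List.flatMap_cons, hg, List.flatMap_map]
  rfl

lemma combosA_zero (xs : List Int) : combosA xs 0 = [[]] := by
  cases xs <;> rfl

lemma pick_perm (s : List Int) :
    ((List.range (2 ^ s.length)).map (pick s)).Perm
      ((List.range (s.length + 1)).flatMap (combosA s)) := by
  induction s with
  | nil => simp [pick, combosA, List.range_succ]
  | cons x xs ih =>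
    have hsplit := (range_even_odd xs.length).map (pick (x :: xs))
    rw [List.map_append, List.map_map, List.map_map] at hsplit
    have he : (pick (x :: xs)) ∘ (fun k => 2 * k) = pick xs := funext fun k => pick_double x xs k
    have ho : (pick (x :: xs)) ∘ (fun k => 2 * k + 1) = fun k => x :: pick xs k :=
      funext fun k => pick_double_one x xs k
    rw [he, ho] at hsplit
    -- now transform the odd part into a map over the even part
    have ho2 : (List.range (2 ^ xs.length)).map (fun k => x :: pick xs k)
        = ((List.range (2 ^ xs.length)).map (pick xs)).map (fun c => x :: c) := by
      rw [List.map_map]; rfl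
    rw [ho2] at hsplit
    have hstep : (((List.range (2 ^ xs.length)).map (pick xs)) ++
          ((List.range (2 ^ xs.length)).map (pick xs)).map (fun c => x :: c)).Perm
        (((List.range (xs.length + 1)).flatMap (combosA xs)) ++
          ((List.range (xs.length + 1)).flatMap (combosA xs)).map (fun c => x :: c)) :=
      (ih.append (ih.map (fun c => x :: c)))
    refine (hsplit.trans hstep).trans ?_
    -- RHS decomposition
    have hrhs : (List.range ((x :: xs).length + 1)).flatMap (combosA (x :: xs))
        = [] :: (List.range (xs.length + 1)).flatMap
            (fun m => (combosA xs m).map (fun c => x :: c) ++ combosA xs (m + 1)) := by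
      rw [List.length_cons, flatMap_succ_head (combosA (x :: xs)) (combosA_zero _)]
      exact congrArg (fun f => [] :: List.flatMap f (List.range (xs.length + 1))) (funext fun m => rfl)
    rw [hrhs]
    have hsplit2 : ((List.range (xs.length + 1)).flatMap
          (fun m => (combosA xs m).map (fun c => x :: c) ++ combosA xs (m + 1))).Perm
        ((List.range (xs.length + 1)).flatMap (fun m => (combosA xs m).map (fun c => x :: c)) ++
         (List.range (xs.length + 1)).flatMap (fun m => combosA xs (m + 1))) :=
      (List.flatMap_append_perm _ _ _).symm
    have hmap : (List.range (xs.length + 1)).flatMap (fun m => (combosA xs m).map (fun c => x :: c))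
        = ((List.range (xs.length + 1)).flatMap (combosA xs)).map (fun c => x :: c) :=
      List.map_flatMap.symm
    have htail : (List.range (xs.length + 1)).flatMap (fun m => combosA xs (m + 1))
        = (List.range xs.length).flatMap (fun m => combosA xs (m + 1)) := by
      rw [List.range_succ, List.flatMap_append, List.flatMap_cons, List.flatMap_nil,
        combosA_big xs (xs.length + 1) (by omega)]
      simp
    have hhead : (List.range (xs.length + 1)).flatMap (combosA xs)
        = [] :: (List.range xs.length).flatMap (fun m => combosA xs (m + 1)) :=
      flatMap_succ_head (combosA xs) (combosA_zero xs) _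
    -- assemble: LHS side list = ([] :: T) ++ (([] :: T).map cons) ; RHS = [] :: (map-part ++ T)
    rw [hhead]
    refine List.Perm.trans ?_ (List.Perm.cons _ hsplit2.symm)
    rw [hmap, htail, hhead]
    simp only [List.cons_append]
    refine List.Perm.cons _ ?_
    exact List.perm_append_comm

lemma sums_perm (s : List Int) :
    ((PySem.List.pyRange 1 ((1 : Int) <<< s.length) 1).map (fun m => selSumB s 0 m)).Perm
      ((PySem.List.pyRange 1 ((s.length : Int) + 1) 1).flatMap
        (fun m => (combosA s m.toNat).map (·.sum))) := by
  have h1 : (1 : Nat) ≤ 2 ^ s.length := Nat.one_le_two_pow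
  -- strip the empty subset off both sides of pick_perm
  have hL : (List.range (2 ^ s.length)).map (pick s)
      = [] :: (List.range (2 ^ s.length - 1)).map (fun k => pick s (k + 1)) := by
    rw [show 2 ^ s.length = (2 ^ s.length - 1) + 1 by omega, List.range_succ_eq_map,
      List.map_cons, pick_zero, List.map_map]
    rfl
  have hR : (List.range (s.length + 1)).flatMap (combosA s)
      = [] :: (List.range s.length).flatMap (fun m => combosA s (m + 1)) :=
    flatMap_succ_head (combosA s) (combosA_zero s) _
  have P : ((List.range (2 ^ s.length - 1)).map (fun k => pick s (k + 1))).Perm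
      ((List.range s.length).flatMap (fun m => combosA s (m + 1))) := by
    have := pick_perm s
    rw [hL, hR] at this
    exact this.cons_inv
  have Psum := P.map List.sum
  rw [List.map_map, List.map_flatMap] at Psum
  -- identify the B side
  have hshift : (1 : Int) <<< s.length = ((2 ^ s.length : Nat) : Int) := by
    rw [Int.shiftLeft_eq]; push_cast; ring
  have hB : (PySem.List.pyRange 1 ((1 : Int) <<< s.length) 1).map (fun m => selSumB s 0 m)
      = (List.range (2 ^ s.length - 1)).map (fun k => (pick s (k + 1)).sum) := by
    rw [hshift, PySem.List.pyRange_one, List.map_map]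
    rw [show (((2 ^ s.length : Nat) : Int) - 1).toNat = 2 ^ s.length - 1 by omega]
    congr 1
    funext k
    show selSumB s 0 (1 + (k : Int)) = (pick s (k + 1)).sum
    rw [show (1 + (k : Int)) = ((k + 1 : Nat) : Int) by push_cast; ring, selSumB_pick]
    ring
  have hA : (PySem.List.pyRange 1 ((s.length : Int) + 1) 1).flatMap
        (fun m => (combosA s m.toNat).map (·.sum))
      = (List.range s.length).flatMap (fun m => (combosA s (m + 1)).map List.sum) := by
    rw [PySem.List.pyRange_one, List.flatMap_map]
    rw [show (((s.length : Int) + 1) - 1).toNat = s.length by omega]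
    congr 1
    funext k
    show (combosA s ((1 + (k : Int)).toNat)).map (·.sum) = (combosA s (k + 1)).map List.sum
    rw [show ((1 + (k : Int)).toNat) = k + 1 by omega]
  rw [hA, hB]
  have : (fun k => (pick s (k + 1)).sum) = (List.sum ∘ fun k => pick s (k + 1)) := rfl
  rw [this]
  exact Psum

lemma specialSum_eq (s : List Int) : specialSumA s = specialSumB s := by
  rw [specialSumA, specialSumB, phase1_eq]
  by_cases h : phase1B (s.zip s.reverse) 0 0
  · rw [if_pos h, if_pos h, phase2A_chk, phase2B_chk]
    have hperm := sums_perm s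
    rw [Bool.eq_iff_iff, chk_iff, chk_iff]
    simp only [PySem.Set.empty, List.not_mem_nil, not_false_iff, implies_true, and_true]
    exact ⟨fun hn => hperm.symm.nodup_iff.mp hn, fun hn => hperm.nodup_iff.mp hn⟩
  · rw [if_neg h, if_neg h]

-- ===== VERDICT (by name: the statement is the Claim_ definition above) =====
theorem wobble_spec : Claim_equal_wobble := by
  intro s delta _
  unfold Spec_wobble wobble wobble_alt
  have h : (fun (st : Int × List Int) (vdelta : List Int) =>
      let s2 := (s.zip vdelta).map (fun p => p.1 + p.2)
      if s2.sum < st.1 then (if specialSumA s2 then (s2.sum, s2) else st) else st)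
    = (fun (st : Int × List Int) (vdelta : List Int) =>
      let s2 := (s.zip vdelta).map (fun p => p.1 + p.2)
      if s2.sum < st.1 then (if specialSumB s2 then (s2.sum, s2) else st) else st) := by
    funext st vdelta
    simp [specialSum_eq]
  rw [h]
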